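-- pv_equiv track=rewrite | github.com/fcodanielcamp/criptografia_2026-2 | ejercicios/cifrado_hill.py | matriz_inversa
-- ===== SOURCE A (Python) =====
-- MOD = 26
--
-- def egcd(a, b):
--     if b == 0:
--         return (a, 1, 0)
--     g, x1, y1 = egcd(b, a % b)
--     return (g, y1, x1 - (a // b) * y1)
--
-- def inverso_mod(a):
--     g, x, _ = egcd(a, MOD)
--     if g != 1:
--         return None
--     return x % MOD
--
-- def determinante(M):
--     return (
--         M[0][0]*(M[1][1]*M[2][2] - M[1][2]*M[2][1])
--         - M[0][1]*(M[1][0]*M[2][2] - M[1][2]*M[2][0])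
--         + M[0][2]*(M[1][0]*M[2][1] - M[1][1]*M[2][0])
--     )
--
-- def matriz_inversa(M):
--     det = determinante(M)
--     inv_det = inverso_mod(det)
--     if inv_det is None:
--         return None
--
--     # matriz de cofactores transpuesta (adjunta)
--     adj = [
--         [
--             (M[1][1]*M[2][2] - M[1][2]*M[2][1]),
--             -(M[0][1]*M[2][2] - M[0][2]*M[2][1]),
--             (M[0][1]*M[1][2] - M[0][2]*M[1][1])
--         ],
--         [
--             -(M[1][0]*M[2][2] - M[1][2]*M[2][0]),
--             (M[0][0]*M[2][2] - M[0][2]*M[2][0]),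
--             -(M[0][0]*M[1][2] - M[0][2]*M[1][0])
--         ],
--         [
--             (M[1][0]*M[2][1] - M[1][1]*M[2][0]),
--             -(M[0][0]*M[2][1] - M[0][1]*M[2][0]),
--             (M[0][0]*M[1][1] - M[0][1]*M[1][0])
--         ]
--     ]
--
--     inv = []
--     for fila in adj:
--         nueva = []
--         for val in fila:
--             nueva.append((val * inv_det) % MOD)
--         inv.append(nueva)
--
--     return inv
-- ===== SOURCE B (Python) =====
-- MOD = 26
--
-- def _minor_det(M, i, j):
--     rows = [r for r in range(3) if r != i]
--     cols = [c for c in range(3) if c != j]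
--     a, b = rows
--     c, d = cols
--     return M[a][c] * M[b][d] - M[a][d] * M[b][c]
--
-- def matriz_inversa(M):
--     det = 0
--     for j in range(3):
--         det += (-1) ** j * M[0][j] * _minor_det(M, 0, j)
--
--     inv_det = None
--     for i in range(MOD):
--         if (det * i) % MOD == 1:
--             inv_det = i
--             break
--     if inv_det is None:
--         return None
--
--     return [[((-1) ** (i + j) * _minor_det(M, j, i) * inv_det) % MOD
--              for j in range(3)] for i in range(3)]
-- ===== Notes on version B (the rewrite author's own statement) =====
-- stated objective: alternative
-- what changed: Replaces the recursive extended-gcd modular inverse with a brute-force search over range(26), and replaces the nine hardcoded adjugate cofactors and first-row determinant formula with a generic 2x2-minor helper driven by range(3) loops with (-1)**(i+j) signs and transposed placement.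
import Mathlib
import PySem

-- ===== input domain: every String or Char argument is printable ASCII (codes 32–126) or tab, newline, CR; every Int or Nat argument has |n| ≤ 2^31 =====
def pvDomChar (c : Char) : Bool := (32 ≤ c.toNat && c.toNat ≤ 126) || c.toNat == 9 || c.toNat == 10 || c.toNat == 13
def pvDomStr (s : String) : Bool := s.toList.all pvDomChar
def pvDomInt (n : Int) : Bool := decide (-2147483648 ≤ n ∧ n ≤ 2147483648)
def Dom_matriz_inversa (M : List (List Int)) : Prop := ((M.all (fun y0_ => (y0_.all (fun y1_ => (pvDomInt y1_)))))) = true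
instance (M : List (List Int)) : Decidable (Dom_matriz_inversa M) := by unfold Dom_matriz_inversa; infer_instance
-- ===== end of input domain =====

-- B replaces A's extended-gcd inverse by a brute-force search over 0..25 and A's
-- hardcoded adjugate/determinant formulas by a generic 2x2-minor cofactor computation
-- (objective: alternative, same cost).

-- ===== PORT A =====
-- total lookup M[i][j]: on Pre_ inputs every index used is in range, so getD equals Python's M[i][j]
def pvEntry (M : List (List Int)) (i j : Nat) : Int := (M.getD i []).getD j 0

-- egcd with a fuel guard only to make the same computation total (never exhausted for
-- inverso_mod's call egcd a 26: Euclid starting from 26 takes far fewer than 64 steps)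
def pvEgcd : Nat → Int → Int → Int × Int × Int
  | 0, _, _ => (0, 0, 0)
  | fuel+1, a, b =>
    if b = 0 then (a, 1, 0)
    else
      let p := pvEgcd fuel b (PySem.Int.mod a b)
      (p.1, p.2.2, p.2.1 - PySem.Int.floordiv a b * p.2.2)

def pvInversoMod (a : Int) : Option Int :=
  let e := pvEgcd 64 a 26
  if e.1 ≠ 1 then none else some (PySem.Int.mod e.2.1 26)

def pvDeterminante (M : List (List Int)) : Int :=
  pvEntry M 0 0 * (pvEntry M 1 1 * pvEntry M 2 2 - pvEntry M 1 2 * pvEntry M 2 1)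
  - pvEntry M 0 1 * (pvEntry M 1 0 * pvEntry M 2 2 - pvEntry M 1 2 * pvEntry M 2 0)
  + pvEntry M 0 2 * (pvEntry M 1 0 * pvEntry M 2 1 - pvEntry M 1 1 * pvEntry M 2 0)

def matriz_inversa (M : List (List Int)) : Option (List (List Int)) :=
  let det := pvDeterminante M
  match pvInversoMod det with
  | none => none
  | some inv_det =>
    let adj : List (List Int) := [
      [pvEntry M 1 1 * pvEntry M 2 2 - pvEntry M 1 2 * pvEntry M 2 1,
       -(pvEntry M 0 1 * pvEntry M 2 2 - pvEntry M 0 2 * pvEntry M 2 1),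
       pvEntry M 0 1 * pvEntry M 1 2 - pvEntry M 0 2 * pvEntry M 1 1],
      [-(pvEntry M 1 0 * pvEntry M 2 2 - pvEntry M 1 2 * pvEntry M 2 0),
       pvEntry M 0 0 * pvEntry M 2 2 - pvEntry M 0 2 * pvEntry M 2 0,
       -(pvEntry M 0 0 * pvEntry M 1 2 - pvEntry M 0 2 * pvEntry M 1 0)],
      [pvEntry M 1 0 * pvEntry M 2 1 - pvEntry M 1 1 * pvEntry M 2 0,
       -(pvEntry M 0 0 * pvEntry M 2 1 - pvEntry M 0 1 * pvEntry M 2 0),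
       pvEntry M 0 0 * pvEntry M 1 1 - pvEntry M 0 1 * pvEntry M 1 0]]
    some (adj.map (fun fila => fila.map (fun val => PySem.Int.mod (val * inv_det) 26)))

-- ===== PORT B =====
-- 2x2 minor determinant after deleting row i and column j (i j < 3)
def pvMinorDet (M : List (List Int)) (i j : Nat) : Int :=
  let rows := (List.range 3).filter (fun r => r ≠ i)
  let cols := (List.range 3).filter (fun c => c ≠ j)
  let a := rows.getD 0 0
  let b := rows.getD 1 0
  let c := cols.getD 0 0
  let d := cols.getD 1 0
  pvEntry M a c * pvEntry M b d - pvEntry M a d * pvEntry M b c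

def matriz_inversa_alt (M : List (List Int)) : Option (List (List Int)) :=
  let det := (List.range 3).foldl
    (fun acc j => acc + (-1 : Int) ^ j * pvEntry M 0 j * pvMinorDet M 0 j) 0
  match (List.range 26).findSome?
      (fun i : Nat => if PySem.Int.mod (det * (i : Int)) 26 = 1 then some ((i : Int)) else none) with
  | none => none
  | some inv_det =>
    some ((List.range 3).map (fun i => (List.range 3).map (fun j =>
      PySem.Int.mod ((-1 : Int) ^ (i + j) * pvMinorDet M j i * inv_det) 26)))

-- ===== PRECONDITION & SPEC =====
-- Pre_ excludes exactly the inputs where A raises IndexError: fewer than 3 rows, or one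
-- of the first three rows shorter than 3.
def Pre_matriz_inversa (M : List (List Int)) : Prop :=
  3 ≤ M.length ∧ 3 ≤ (M.getD 0 []).length ∧ 3 ≤ (M.getD 1 []).length ∧ 3 ≤ (M.getD 2 []).length
instance (M : List (List Int)) : Decidable (Pre_matriz_inversa M) := by
  unfold Pre_matriz_inversa; infer_instance
def pvWitness_matriz_inversa : List (List Int) := [[1, 2, 3], [0, 1, 4], [5, 6, 0]]

def Spec_matriz_inversa (M : List (List Int)) (out : Option (List (List Int))) : Prop := out = matriz_inversa_alt M
instance (M : List (List Int)) (out : Option (List (List Int))) : Decidable (Spec_matriz_inversa M out) := by unfold Spec_matriz_inversa; infer_instance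

-- ===== CLAIM (what is proved, stated in full; the proofs are below) =====
def Claim_equal_matriz_inversa : Prop := ∀ (M : List (List Int)), Dom_matriz_inversa M → Pre_matriz_inversa M → Spec_matriz_inversa M (matriz_inversa M)

-- ===== LEMMAS AND PROOFS =====

-- both inverse computations only depend on d % 26; checked case by case on 0..25
lemma inv_core : ∀ r : Int, 0 ≤ r → r < 26 →
    (if (pvEgcd 63 26 r).1 ≠ 1 then none
     else some (PySem.Int.mod (pvEgcd 63 26 r).2.2 26)) =
    (List.range 26).findSome?
      (fun i : Nat => if PySem.Int.mod (r * (i : Int)) 26 = 1 then some ((i : Int)) else none) := by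
  intro r h1 h2
  interval_cases r <;> decide

lemma inv_lemma (d : Int) : pvInversoMod d =
    (List.range 26).findSome?
      (fun i : Nat => if PySem.Int.mod (d * (i : Int)) 26 = 1 then some ((i : Int)) else none) := by
  have hpos : (0 : Int) < 26 := by norm_num
  have hmod : PySem.Int.mod d 26 = d % 26 := PySem.Int.mod_eq_emod_of_pos hpos
  have hstep : pvEgcd 64 d 26 =
      (let p := pvEgcd 63 26 (PySem.Int.mod d 26);
       (p.1, p.2.2, p.2.1 - PySem.Int.floordiv d 26 * p.2.2)) := by
    rfl
  have hpred : (fun i : Nat =>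
      if PySem.Int.mod (d * (i : Int)) 26 = 1 then some ((i : Int)) else none) =
      (fun i : Nat =>
      if PySem.Int.mod ((d % 26) * (i : Int)) 26 = 1 then some ((i : Int)) else none) := by
    funext i
    have : PySem.Int.mod (d * (i : Int)) 26 = PySem.Int.mod ((d % 26) * (i : Int)) 26 := by
      rw [PySem.Int.mod_eq_emod_of_pos hpos, PySem.Int.mod_eq_emod_of_pos hpos,
        Int.mul_emod]
      conv_rhs => rw [Int.mul_emod, Int.emod_emod_of_dvd _ dvd_rfl]
    rw [this]
  rw [hpred]
  unfold pvInversoMod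
  rw [hstep, hmod]
  exact inv_core (d % 26) (Int.emod_nonneg d (by norm_num)) (Int.emod_lt_of_pos d hpos)

-- ===== VERDICT (by name: the statement is the Claim_ definition above) =====
theorem matriz_inversa_spec : Claim_equal_matriz_inversa := by
  intro M _ hpre
  unfold Spec_matriz_inversa
  obtain ⟨h0, h1, h2, h3⟩ := hpre
  rcases M with _ | ⟨r0, M⟩; · simp at h0
  rcases M with _ | ⟨r1, M⟩; · simp at h0
  rcases M with _ | ⟨r2, M⟩; · simp at h0
  simp only [List.getD_cons_zero, List.getD_cons_succ] at h1 h2 h3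
  rcases r0 with _ | ⟨a, r0⟩; · simp at h1
  rcases r0 with _ | ⟨b, r0⟩; · simp at h1
  rcases r0 with _ | ⟨c, r0⟩; · simp at h1
  rcases r1 with _ | ⟨d, r1⟩; · simp at h2
  rcases r1 with _ | ⟨e, r1⟩; · simp at h2
  rcases r1 with _ | ⟨f, r1⟩; · simp at h2
  rcases r2 with _ | ⟨g, r2⟩; · simp at h3
  rcases r2 with _ | ⟨h, r2⟩; · simp at h3
  rcases r2 with _ | ⟨i, r2⟩; · simp at h3
  simp only [matriz_inversa, matriz_inversa_alt, pvDeterminante, pvMinorDet, pvEntry,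
    List.range_succ, List.range_zero, List.filter, List.foldl, List.map, List.getD,
    List.getElem?_cons_zero, List.getElem?_cons_succ,
    List.nil_append, List.cons_append]
  rw [inv_lemma]
  simp only [List.range_succ, List.range_zero, List.nil_append, List.cons_append]
  norm_num
  ring_nf
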